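-- pv_equiv track=rewrite | github.com/brianlyang/identity-protocol | scripts/docs_command_contract_check.py | _snippet_to_commands
-- ===== SOURCE A (Python) =====
-- from typing import List, Set, Tuple
--
-- def _snippet_to_commands(snippet: str) -> List[str]:
--     # Split fenced-like inline blocks into executable command lines.
--     # Supports simple "\" line continuation.
--     if "\n" not in snippet:
--         return [snippet.strip()]
--     lines = [ln.rstrip() for ln in snippet.splitlines()]
--     cmds: List[str] = []
--     cur = ""
--     for ln in lines:
--         s = ln.strip()
--         if not s or s.startswith("#") or s in {"bash", "sh", "zsh"}:
--             continue
--         if cur: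
--             cur = f"{cur} {s}"
--         else:
--             cur = s
--         if cur.endswith("\\"):
--             cur = cur[:-1].rstrip()
--             continue
--         cmds.append(cur)
--         cur = ""
--     if cur:
--         cmds.append(cur)
--     return cmds
-- ===== SOURCE B (Python) =====
-- from typing import List
--
-- def _piece(s: str) -> str:
--     return s[:-1].rstrip() if s.endswith("\\") else s
--
-- def _emit(lines: List[str]) -> List[str]:
--     # Recursive: peel off one command (a maximal run of "\"-continued lines plus
--     # its terminator) per call, joining the non-empty pieces of the group.
--     if not lines:
--         return []
--     n = 0
--     while n < len(lines) and lines[n].endswith("\\"):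
--         n += 1
--     if n == len(lines):  # trailing continuations with no terminating line
--         cmd = " ".join(p for p in map(_piece, lines) if p)
--         return [cmd] if cmd else []
--     return [" ".join(p for p in map(_piece, lines[:n + 1]) if p)] + _emit(lines[n + 1:])
--
-- def _snippet_to_commands(snippet: str) -> List[str]:
--     if "\n" not in snippet:
--         return [snippet.strip()]
--     meaningful = [t for t in (ln.strip() for ln in snippet.splitlines())
--                   if t and not t.startswith("#") and t not in {"bash", "sh", "zsh"}]
--     return _emit(meaningful)
-- ===== Notes on version B (the rewrite author's own statement) =====
-- stated objective: alternative
-- what changed: Replaces A's single pass with a mutable growing-string accumulator by staged passes: a comprehension filters the meaningful stripped lines, then a recursive function peels off one command group at a time (a maximal run of backslash-continued lines plus its terminator) and space-joins the non-empty de-continued pieces of each group.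
import Mathlib
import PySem

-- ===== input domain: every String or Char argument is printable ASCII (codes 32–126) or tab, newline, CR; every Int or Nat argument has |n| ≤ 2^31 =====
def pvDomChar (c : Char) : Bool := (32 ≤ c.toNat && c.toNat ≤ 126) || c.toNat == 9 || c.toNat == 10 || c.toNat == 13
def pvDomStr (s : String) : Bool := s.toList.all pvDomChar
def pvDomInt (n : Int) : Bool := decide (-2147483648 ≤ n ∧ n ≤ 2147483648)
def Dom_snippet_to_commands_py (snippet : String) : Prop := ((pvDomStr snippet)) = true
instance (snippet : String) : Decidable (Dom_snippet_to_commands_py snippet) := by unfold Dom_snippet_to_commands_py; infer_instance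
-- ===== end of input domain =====

-- B replaces A's single interleaved loop with a mutable growing-string accumulator by staged
-- passes: filter the meaningful stripped lines, then a RECURSIVE function peels off one command
-- group per call (a maximal run of backslash-continued lines plus its terminator) and space-joins
-- the non-empty de-continued pieces of each group; objective: alternative decomposition, same cost.

-- ===== PORT A =====
-- the skip condition 'not s or s.startswith("#") or s in {"bash","sh","zsh"}' (same text in both Pythons)
def pvSkip (s : List Char) : Bool :=
  s.isEmpty || PySem.Chars.startswith s ['#'] || s == "bash".toList || s == "sh".toList || s == "zsh".toList

-- A's loop body after 'continue': cur-update, continuation check, append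
def pvStepA (st : List String × List Char) (s : List Char) : List String × List Char :=
  let cur := if !st.2.isEmpty then st.2 ++ [' '] ++ s else s
  if PySem.Chars.endswith cur ['\\'] then
    (st.1, PySem.Chars.rstrip (PySem.Chars.slice cur none (some (-1))))
  else
    (st.1 ++ [String.ofList cur], [])

def snippet_to_commands_py (snippet : String) : List String :=
  if ¬ (PySem.Str.isIn "\n" snippet = true) then [PySem.Str.strip snippet]
  else
    let lines := (PySem.Chars.splitlines snippet.toList).map PySem.Chars.rstrip
    let st := lines.foldl (fun st ln =>
      let s := PySem.Chars.strip ln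
      if pvSkip s then st else pvStepA st s) (([], []) : List String × List Char)
    if !st.2.isEmpty then st.1 ++ [String.ofList st.2] else st.1

-- ===== PORT B =====
-- Source B's helper _piece: s[:-1].rstrip() if s.endswith("\\") else s
def pvCont (s : List Char) : Bool := PySem.Chars.endswith s ['\\']

def pvPiece (s : List Char) : List Char :=
  if pvCont s then PySem.Chars.rstrip (PySem.Chars.slice s none (some (-1))) else s

-- '" ".join(p for p in map(_piece, g) if p)'
def pvGroupCmd (g : List (List Char)) : List Char :=
  PySem.Chars.join [' '] ((g.map pvPiece).filter (fun p => !p.isEmpty))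

-- Source B's recursive _emit; the while-loop scan for the first non-continuation line is exactly
-- the length n of the takeWhile prefix of continuation lines.
def pvEmit (lines : List (List Char)) : List String :=
  if _h : lines.isEmpty then []
  else
    let n := (lines.takeWhile pvCont).length
    if n = lines.length then
      let cmd := pvGroupCmd lines
      if !cmd.isEmpty then [String.ofList cmd] else []
    else
      String.ofList (pvGroupCmd (lines.take (n + 1))) :: pvEmit (lines.drop (n + 1))
termination_by lines.length
decreasing_by
  simp only [List.length_drop]
  have hl : lines ≠ [] := by simpa using _h
  have : 0 < lines.length := List.length_pos_iff.mpr hl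
  omega

def snippet_to_commands_py_alt (snippet : String) : List String :=
  if ¬ (PySem.Str.isIn "\n" snippet = true) then [PySem.Str.strip snippet]
  else
    let meaningful := ((PySem.Chars.splitlines snippet.toList).map PySem.Chars.strip).filter (fun t => !pvSkip t)
    pvEmit meaningful

-- ===== PRECONDITION & SPEC =====
def Spec_snippet_to_commands_py (snippet : String) (out : List String) : Prop := out = snippet_to_commands_py_alt snippet
instance (snippet : String) (out : List String) : Decidable (Spec_snippet_to_commands_py snippet out) := by unfold Spec_snippet_to_commands_py; infer_instance

-- ===== CLAIM (what is proved, stated in full; the proofs are below) =====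
def Claim_equal_snippet_to_commands_py : Prop := ∀ (snippet : String), Dom_snippet_to_commands_py snippet → Spec_snippet_to_commands_py snippet (snippet_to_commands_py snippet)

-- ===== LEMMAS AND PROOFS =====

-- proof-side intermediate: the fold of the reviewer's "parts list" formulation, used as a bridge
-- between A's fold and B's recursion
def pvStepB (st : List String × List (List Char)) (s : List Char) : List String × List (List Char) :=
  if pvCont s then
    let piece := pvPiece s
    if !piece.isEmpty then (st.1, st.2 ++ [piece]) else st
  else
    (st.1 ++ [String.ofList (PySem.Chars.join [' '] (st.2 ++ [s]))], [])

def pvFinB (st : List String × List (List Char)) : List String :=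
  if !st.2.isEmpty then st.1 ++ [String.ofList (PySem.Chars.join [' '] st.2)] else st.1

-- one unrolled step of pvEmit generalized by the pending parts of the current group
def pvEmitAux (parts lines : List (List Char)) : List String :=
  match lines.drop (lines.takeWhile pvCont).length with
  | [] =>
      if !(parts ++ ((lines.takeWhile pvCont).map pvPiece).filter (fun p => !p.isEmpty)).isEmpty then
        [String.ofList (PySem.Chars.join [' '] (parts ++ ((lines.takeWhile pvCont).map pvPiece).filter (fun p => !p.isEmpty)))]
      else []
  | r :: rs =>
      String.ofList (PySem.Chars.join [' ']
        ((parts ++ ((lines.takeWhile pvCont).map pvPiece).filter (fun p => !p.isEmpty)) ++ [r])) :: pvEmit rs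

-- rstrip on a cons, by dropWhile_append on the reversed list
lemma pv_rstrip_cons (c : Char) (t : List Char) :
    PySem.Chars.rstrip (c :: t) =
      if PySem.Chars.rstrip t = [] then (if PySem.Chars.isspace c then [] else [c])
      else c :: PySem.Chars.rstrip t := by
  simp only [PySem.Chars.rstrip, List.reverse_cons, List.dropWhile_append]
  by_cases h : List.dropWhile PySem.Chars.isspace t.reverse = []
  · by_cases hc : PySem.Chars.isspace c <;>
      simp [h, hc]
  · simp [h, List.isEmpty_eq_false_iff.mpr h]

lemma pv_rstrip_nil : PySem.Chars.rstrip ([] : List Char) = [] := by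
  simp [PySem.Chars.rstrip]

-- rstrip is idempotent
lemma pv_rstrip_idem (l : List Char) : PySem.Chars.rstrip (PySem.Chars.rstrip l) = PySem.Chars.rstrip l := by
  simp [PySem.Chars.rstrip, List.dropWhile_idempotent]

-- rstrip l = [] iff l is all whitespace
lemma pv_rstrip_eq_nil_iff (l : List Char) : PySem.Chars.rstrip l = [] ↔ l.all PySem.Chars.isspace := by
  simp [PySem.Chars.rstrip, List.dropWhile_eq_nil_iff, List.all_eq_true]

lemma pv_lstrip_eq_nil_iff (l : List Char) : PySem.Chars.lstrip l = [] ↔ l.all PySem.Chars.isspace := by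
  simp [PySem.Chars.lstrip, List.dropWhile_eq_nil_iff, List.all_eq_true]

-- stripping after rstrip is the same as stripping
lemma pv_strip_rstrip (l : List Char) : PySem.Chars.strip (PySem.Chars.rstrip l) = PySem.Chars.strip l := by
  induction l with
  | nil => rfl
  | cons c t ih =>
    cases hc : PySem.Chars.isspace c with
    | true =>
      by_cases h : PySem.Chars.rstrip t = []
      · rw [pv_rstrip_cons, if_pos h, if_pos hc]
        have hlt : List.dropWhile PySem.Chars.isspace t = [] :=
          (pv_lstrip_eq_nil_iff t).mpr ((pv_rstrip_eq_nil_iff t).mp h)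
        show PySem.Chars.strip [] = PySem.Chars.strip (c :: t)
        simp [PySem.Chars.strip, PySem.Chars.lstrip, hc, hlt, pv_rstrip_nil]
      · rw [pv_rstrip_cons, if_neg h]
        show PySem.Chars.strip (c :: PySem.Chars.rstrip t) = PySem.Chars.strip (c :: t)
        simp only [PySem.Chars.strip, PySem.Chars.lstrip, List.dropWhile_cons, hc, if_true]
        exact ih
    | false =>
      have hcons : ∀ u : List Char, PySem.Chars.rstrip (c :: u) = c :: PySem.Chars.rstrip u := by
        intro u
        rw [pv_rstrip_cons]
        by_cases h : PySem.Chars.rstrip u = []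
        · rw [if_pos h, if_neg (by simp [hc]), h]
        · rw [if_neg h]
      show PySem.Chars.strip (PySem.Chars.rstrip (c :: t)) = PySem.Chars.strip (c :: t)
      rw [hcons t]
      simp only [PySem.Chars.strip, PySem.Chars.lstrip, List.dropWhile_cons, hc,
        Bool.false_eq_true, if_false]
      rw [hcons (PySem.Chars.rstrip t), hcons t, pv_rstrip_idem]

lemma pv_rstrip_strip (l : List Char) : PySem.Chars.rstrip (PySem.Chars.strip l) = PySem.Chars.strip l := by
  show PySem.Chars.rstrip (PySem.Chars.rstrip (PySem.Chars.lstrip l)) = _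
  exact pv_rstrip_idem _

lemma pv_rstrip_append_of_ne_nil (x y : List Char) (h : PySem.Chars.rstrip y ≠ []) :
    PySem.Chars.rstrip (x ++ y) = x ++ PySem.Chars.rstrip y := by
  have h' : List.dropWhile PySem.Chars.isspace y.reverse ≠ [] := by
    intro hh
    exact h (by simp [PySem.Chars.rstrip, hh])
  simp [PySem.Chars.rstrip, List.reverse_append, List.dropWhile_append,
    List.isEmpty_eq_false_iff.mpr h']

lemma pv_rstrip_append_of_nil (x y : List Char) (h : PySem.Chars.rstrip y = []) :
    PySem.Chars.rstrip (x ++ y) = PySem.Chars.rstrip x := by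
  have h' : List.dropWhile PySem.Chars.isspace y.reverse = [] := by
    have := congrArg List.reverse h
    simpa [PySem.Chars.rstrip] using this
  simp [PySem.Chars.rstrip, List.reverse_append, List.dropWhile_append, h']

-- a nonempty right factor decides endswith of an append
lemma pv_endswith_iff (l : List Char) (c : Char) :
    PySem.Chars.endswith l [c] = true ↔ l.getLast? = some c := by
  show ([c].isSuffixOf l) = true ↔ _
  rw [List.isSuffixOf_iff_suffix, List.getLast?_eq_some_iff]
  constructor
  · rintro ⟨t, ht⟩; exact ⟨t, ht.symm⟩
  · rintro ⟨t, ht⟩; exact ⟨t, ht.symm⟩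

lemma pv_endswith_append (x s : List Char) (c : Char) (h : s ≠ []) :
    PySem.Chars.endswith (x ++ s) [c] = PySem.Chars.endswith s [c] := by
  rw [Bool.eq_iff_iff, pv_endswith_iff, pv_endswith_iff,
    List.getLast?_append_of_ne_nil x h]

-- s[:-1] is dropLast
lemma pv_slice_neg_one (s : List Char) : PySem.Chars.slice s none (some (-1)) = s.dropLast := by
  simp [pysem]

lemma pv_join_append_singleton (sep : List Char) (parts : List (List Char)) (s : List Char) (h : parts ≠ []) :
    PySem.Chars.join sep (parts ++ [s]) = PySem.Chars.join sep parts ++ sep ++ s := by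
  induction parts with
  | nil => exact absurd rfl h
  | cons a rest ih =>
    cases rest with
    | nil =>
      rw [show ([a] : List (List Char)) ++ [s] = [a, s] from rfl,
        PySem.Chars.join_cons_cons, PySem.Chars.join_singleton, PySem.Chars.join_singleton]
    | cons b r =>
      rw [show (a :: b :: r) ++ [s] = a :: ((b :: r) ++ [s]) from rfl]
      rw [show (b :: r) ++ [s] = b :: (r ++ [s]) from rfl]
      rw [PySem.Chars.join_cons_cons, show b :: (r ++ [s]) = (b :: r) ++ [s] from rfl,
        ih (by simp), PySem.Chars.join_cons_cons]
      simp [List.append_assoc]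

lemma pv_join_ne_nil (parts : List (List Char)) (h : parts ≠ []) (h2 : ∀ p ∈ parts, p ≠ []) :
    PySem.Chars.join [' '] parts ≠ [] := by
  cases parts with
  | nil => exact absurd rfl h
  | cons a rest =>
    cases rest with
    | nil =>
      rw [PySem.Chars.join_singleton]
      exact h2 a (by simp)
    | cons b r =>
      rw [PySem.Chars.join_cons_cons]
      simp only [ne_eq, List.append_assoc, List.append_eq_nil_iff]
      intro hh
      exact h2 a (by simp) hh.1

lemma pv_rstrip_join (parts : List (List Char)) (h : ∀ p ∈ parts, PySem.Chars.rstrip p = p ∧ p ≠ []) :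
    PySem.Chars.rstrip (PySem.Chars.join [' '] parts) = PySem.Chars.join [' '] parts := by
  induction parts with
  | nil => simpa [PySem.Chars.join_nil] using pv_rstrip_nil
  | cons a rest ih =>
    cases rest with
    | nil =>
      rw [PySem.Chars.join_singleton]
      exact (h a (by simp)).1
    | cons b r =>
      have hrest : ∀ p ∈ b :: r, PySem.Chars.rstrip p = p ∧ p ≠ [] := by
        intro p hp; exact h p (by simp [hp])
      have hne : PySem.Chars.join [' '] (b :: r) ≠ [] :=
        pv_join_ne_nil _ (by simp) (fun p hp => (hrest p hp).2)
      rw [PySem.Chars.join_cons_cons,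
        pv_rstrip_append_of_ne_nil (a ++ [' ']) _ (by rw [ih hrest]; exact hne), ih hrest]

lemma pv_bnot_isEmpty {α : Type} (l : List α) : ((!l.isEmpty) = true) ↔ l ≠ [] := by
  cases l <;> simp

-- the state relation between A's loop and the parts-fold
def pvRel (a : List String × List Char) (b : List String × List (List Char)) : Prop :=
  a.1 = b.1 ∧ a.2 = PySem.Chars.join [' '] b.2 ∧ ∀ p ∈ b.2, PySem.Chars.rstrip p = p ∧ p ≠ []

lemma pv_step (a : List String × List Char) (b : List String × List (List Char)) (s : List Char)
    (hs : PySem.Chars.rstrip s = s ∧ s ≠ []) (h : pvRel a b) : pvRel (pvStepA a s) (pvStepB b s) := by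
  obtain ⟨h1, h2, h3⟩ := h
  obtain ⟨hs1, hs2⟩ := hs
  have hcur : (if (!a.2.isEmpty) = true then a.2 ++ [' '] ++ s else s)
      = PySem.Chars.join [' '] (b.2 ++ [s]) := by
    cases hb : b.2 with
    | nil =>
      have ha : a.2 = [] := by rw [h2, hb, PySem.Chars.join_nil]
      simp [ha, PySem.Chars.join_singleton]
    | cons p r =>
      have hne : a.2 ≠ [] := by
        rw [h2, hb]
        exact pv_join_ne_nil _ (by simp) (fun q hq => (h3 q (by rw [hb]; exact hq)).2)
      rw [if_pos ((pv_bnot_isEmpty _).mpr hne), h2, hb,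
        pv_join_append_singleton _ _ _ (by simp)]
  have hend : PySem.Chars.endswith (if (!a.2.isEmpty) = true then a.2 ++ [' '] ++ s else s) ['\\']
      = PySem.Chars.endswith s ['\\'] := by
    by_cases he : a.2.isEmpty = true
    · rw [if_neg (by simp [he])]
    · rw [if_pos (by simp [he])]
      exact pv_endswith_append (a.2 ++ [' ']) s '\\' hs2
  simp only [pvStepA, pvStepB, pvCont, pvPiece]
  rw [hend, hcur]
  by_cases hb1 : PySem.Chars.endswith s ['\\'] = true
  · rw [if_pos hb1, if_pos hb1, if_pos hb1, pv_slice_neg_one, pv_slice_neg_one]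
    by_cases hp : PySem.Chars.rstrip s.dropLast = []
    · rw [if_neg (by simp [hp])]
      have hdl : PySem.Chars.rstrip (PySem.Chars.join [' '] (b.2 ++ [s])).dropLast
          = PySem.Chars.join [' '] b.2 := by
        cases hb : b.2 with
        | nil => simpa [PySem.Chars.join_singleton, PySem.Chars.join_nil] using hp
        | cons p r =>
          rw [pv_join_append_singleton _ _ _ (by simp),
            List.dropLast_append_of_ne_nil hs2,
            pv_rstrip_append_of_nil _ _ hp,
            pv_rstrip_append_of_nil _ _ (by decide),
            pv_rstrip_join _ (fun q hq => h3 q (by rw [hb]; exact hq))]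
      exact ⟨h1, hdl, h3⟩
    · rw [if_pos (by simp [hp])]
      have hdl : PySem.Chars.rstrip (PySem.Chars.join [' '] (b.2 ++ [s])).dropLast
          = PySem.Chars.join [' '] (b.2 ++ [PySem.Chars.rstrip s.dropLast]) := by
        cases hb : b.2 with
        | nil => simp [PySem.Chars.join_singleton]
        | cons p r =>
          rw [pv_join_append_singleton _ _ _ (by simp),
            List.dropLast_append_of_ne_nil hs2,
            pv_rstrip_append_of_ne_nil _ _ hp,
            pv_join_append_singleton _ _ _ (by simp)]
      refine ⟨h1, hdl, ?_⟩
      intro q hq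
      rcases List.mem_append.mp hq with hq | hq
      · exact h3 q hq
      · have hq' : q = PySem.Chars.rstrip s.dropLast := by simpa using hq
        subst hq'
        exact ⟨pv_rstrip_idem _, hp⟩
  · rw [if_neg hb1, if_neg hb1]
    exact ⟨by simp [h1], by simp [PySem.Chars.join_nil], by simp⟩

lemma pv_fold_filter {σ : Type} (g : σ → List Char → σ) (L : List (List Char)) (init : σ) :
    (L.map PySem.Chars.rstrip).foldl (fun st ln =>
        let s := PySem.Chars.strip ln
        if pvSkip s then st else g st s) init
      = ((L.map PySem.Chars.strip).filter (fun t => !pvSkip t)).foldl g init := by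
  induction L generalizing init with
  | nil => rfl
  | cons ln L ih =>
    simp only [List.map_cons, List.foldl_cons, List.filter_cons, pv_strip_rstrip]
    cases hsk : pvSkip (PySem.Chars.strip ln) with
    | true =>
      rw [if_pos rfl, if_neg (by simp)]
      exact ih init
    | false =>
      rw [if_neg (by simp), if_pos (by simp), List.foldl_cons]
      exact ih _

lemma pv_fold_rel (M : List (List Char)) (hM : ∀ s ∈ M, PySem.Chars.rstrip s = s ∧ s ≠ [])
    (a : List String × List Char) (b : List String × List (List Char)) (h : pvRel a b) :
    pvRel (M.foldl pvStepA a) (M.foldl pvStepB b) := by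
  induction M generalizing a b with
  | nil => exact h
  | cons s M ih =>
    simp only [List.foldl_cons]
    exact ih (fun t ht => hM t (by simp [ht]))
      _ _ (pv_step a b s (hM s (by simp)) h)

lemma pv_meaningful_prop (snippet : String) :
    ∀ s ∈ ((PySem.Chars.splitlines snippet.toList).map PySem.Chars.strip).filter (fun t => !pvSkip t),
      PySem.Chars.rstrip s = s ∧ s ≠ [] := by
  intro s hsmem
  obtain ⟨hmap, hflt⟩ := List.mem_filter.mp hsmem
  obtain ⟨ln, _, hln⟩ := List.mem_map.mp hmap
  constructor
  · rw [← hln]; exact pv_rstrip_strip ln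
  · intro hnil
    rw [hnil] at hflt
    simp [pvSkip] at hflt

-- the first line after the continuation prefix is not a continuation
lemma pv_dropWhile_head_false {α : Type} (p : α → Bool) (l : List α) (r : α) (rs : List α)
    (h : l.dropWhile p = r :: rs) : p r = false := by
  induction l with
  | nil => simp at h
  | cons a t ih =>
    rw [List.dropWhile_cons] at h
    by_cases hp : p a = true
    · exact ih (by simpa [hp] using h)
    · rw [if_neg hp] at h
      cases h
      simpa using hp

lemma pv_drop_takeWhile_length {α : Type} (p : α → Bool) (l : List α) :
    l.drop (l.takeWhile p).length = l.dropWhile p := by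
  induction l with
  | nil => rfl
  | cons a t ih =>
    cases hp : p a <;> simp [hp, ih]

-- bridging: the recursive pvEmit equals one generalized step with no pending parts
lemma pv_emit_eq_aux (lines : List (List Char)) (hne : ∀ p ∈ lines, p ≠ []) :
    pvEmit lines = pvEmitAux [] lines := by
  rw [pvEmit]
  by_cases h0 : lines.isEmpty
  · have hnil : lines = [] := by simpa using h0
    subst hnil
    simp [pvEmitAux]
  · rw [dif_neg h0]
    by_cases hnl : (lines.takeWhile pvCont).length = lines.length
    · have htw : lines.takeWhile pvCont = lines :=
        (List.takeWhile_prefix pvCont).eq_of_length hnl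
      have hdrop : lines.drop (lines.takeWhile pvCont).length = [] := by
        rw [hnl, List.drop_length]
      rw [if_pos hnl]
      simp only [pvEmitAux, htw, List.drop_length, List.nil_append]
      by_cases hps : (lines.map pvPiece).filter (fun p => !p.isEmpty) = []
      · simp [pvGroupCmd, hps, PySem.Chars.join_nil]
      · have hj : PySem.Chars.join [' '] ((lines.map pvPiece).filter (fun p => !p.isEmpty)) ≠ [] :=
          pv_join_ne_nil _ hps (fun p hp => by
            have := (List.mem_filter.mp hp).2
            simpa [pv_bnot_isEmpty] using this)
        rw [if_pos ((pv_bnot_isEmpty _).mpr (by simpa [pvGroupCmd] using hj)),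
          if_pos ((pv_bnot_isEmpty _).mpr hps)]
        rfl
    · rw [if_neg hnl]
      have hlen : (lines.takeWhile pvCont).length < lines.length :=
        lt_of_le_of_ne (List.takeWhile_prefix pvCont).length_le hnl
      obtain ⟨r, rs, hdc⟩ : ∃ r rs, lines.drop (lines.takeWhile pvCont).length = r :: rs := by
        cases hdd : lines.drop (lines.takeWhile pvCont).length with
        | nil =>
          have := congrArg List.length hdd
          simp [List.length_drop] at this
          omega
        | cons r rs => exact ⟨r, rs, rfl⟩
      have hcontr : pvCont r = false := by
        apply pv_dropWhile_head_false pvCont lines r rs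
        rw [← pv_drop_takeWhile_length pvCont lines]
        exact hdc
      have hrne : r ≠ [] := by
        apply hne
        exact List.mem_of_mem_drop (by rw [hdc]; exact List.mem_cons_self)
      have hrs : lines.drop ((lines.takeWhile pvCont).length + 1) = rs := by
        have := congrArg (List.drop 1) hdc
        simpa [List.drop_drop, Nat.add_comm] using this
      have htake : lines.take ((lines.takeWhile pvCont).length + 1)
          = lines.takeWhile pvCont ++ [r] := by
        rw [List.take_add, hdc,
          (List.prefix_iff_eq_take.mp (List.takeWhile_prefix pvCont)).symm]
        rfl
      have hgc : pvGroupCmd (lines.take ((lines.takeWhile pvCont).length + 1))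
          = PySem.Chars.join [' ']
              ((((lines.takeWhile pvCont).map pvPiece).filter (fun p => !p.isEmpty)) ++ [r]) := by
        rw [htake]
        simp [pvGroupCmd, List.filter_append, pvPiece, hcontr, hrne]
      simp only [pvEmitAux, hdc, hrs, hgc, List.nil_append]

-- consuming one continuation line only extends the pending parts
lemma pv_emitAux_cons_cont (parts : List (List Char)) (s : List Char) (t : List (List Char))
    (hc : pvCont s = true) :
    pvEmitAux parts (s :: t)
      = pvEmitAux (parts ++ (if !(pvPiece s).isEmpty then [pvPiece s] else [])) t := by
  have htw : (s :: t).takeWhile pvCont = s :: t.takeWhile pvCont := by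
    simp [hc]
  simp only [pvEmitAux, htw, List.length_cons, List.drop_succ_cons, List.map_cons,
    List.filter_cons]
  by_cases h2 : (pvPiece s).isEmpty <;>
    cases hd : t.drop (t.takeWhile pvCont).length <;>
      simp only [h2, Bool.not_false, Bool.not_true, if_true,
        List.append_assoc, List.singleton_append] <;>
      try rfl

-- consuming a terminator line flushes the pending parts as one command
lemma pv_emitAux_cons_term (parts : List (List Char)) (s : List Char) (t : List (List Char))
    (hc : pvCont s = false) :
    pvEmitAux parts (s :: t)
      = String.ofList (PySem.Chars.join [' '] (parts ++ [s])) :: pvEmit t := by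
  have htw : (s :: t).takeWhile pvCont = [] := by simp [hc]
  conv_lhs => rw [pvEmitAux.eq_def]
  simp [htw]

-- the parts-fold computes pvEmitAux
lemma pv_foldB_emitAux (M : List (List Char)) (hne : ∀ p ∈ M, p ≠ [])
    (cmds : List String) (parts : List (List Char)) :
    pvFinB (M.foldl pvStepB (cmds, parts)) = cmds ++ pvEmitAux parts M := by
  induction M generalizing cmds parts with
  | nil =>
    by_cases h : parts.isEmpty <;>
      simp [pvFinB, pvEmitAux, h]
  | cons s t ih =>
    have hne' : ∀ p ∈ t, p ≠ [] := fun p hp => hne p (by simp [hp])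
    simp only [List.foldl_cons]
    cases hc : pvCont s with
    | true =>
      have hstep : pvStepB (cmds, parts) s
          = (cmds, parts ++ (if !(pvPiece s).isEmpty then [pvPiece s] else [])) := by
        by_cases h2 : (pvPiece s).isEmpty <;> simp [pvStepB, hc, h2]
      rw [hstep, ih hne', pv_emitAux_cons_cont parts s t hc]
    | false =>
      have hstep : pvStepB (cmds, parts) s
          = (cmds ++ [String.ofList (PySem.Chars.join [' '] (parts ++ [s]))], []) := by
        simp [pvStepB, hc]
      rw [hstep, ih hne', pv_emitAux_cons_term parts s t hc, pv_emit_eq_aux t hne']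
      simp [List.append_assoc]

-- ===== VERDICT (by name: the statement is the Claim_ definition above) =====
theorem snippet_to_commands_py_spec : Claim_equal_snippet_to_commands_py := by
  intro snippet _
  unfold Spec_snippet_to_commands_py
  simp only [snippet_to_commands_py, snippet_to_commands_py_alt]
  by_cases hg : PySem.Str.isIn "\n" snippet = true
  · rw [if_neg (not_not_intro hg), if_neg (not_not_intro hg), pv_fold_filter pvStepA]
    set M := ((PySem.Chars.splitlines snippet.toList).map PySem.Chars.strip).filter
      (fun t => !pvSkip t) with hMdef
    have hMprop := pv_meaningful_prop snippet
    rw [← hMdef] at hMprop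
    have hMne : ∀ p ∈ M, p ≠ [] := fun p hp => (hMprop p hp).2
    have hrel := pv_fold_rel M hMprop
      (([], []) : List String × List Char)
      (([], []) : List String × List (List Char))
      ⟨rfl, by simp [PySem.Chars.join_nil], by simp⟩
    obtain ⟨h1, h2, h3⟩ := hrel
    have hfin : (if !(M.foldl pvStepA (([], []) : List String × List Char)).2.isEmpty then
          (M.foldl pvStepA (([], []) : List String × List Char)).1
            ++ [String.ofList (M.foldl pvStepA (([], []) : List String × List Char)).2]
        else (M.foldl pvStepA (([], []) : List String × List Char)).1)
        = pvFinB (M.foldl pvStepB (([], []) : List String × List (List Char))) := by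
      unfold pvFinB
      by_cases hb : (M.foldl pvStepB (([], []) : List String × List (List Char))).2 = []
      · have ha : (M.foldl pvStepA (([], []) : List String × List Char)).2 = [] := by
          rw [h2, hb, PySem.Chars.join_nil]
        rw [if_neg (by simp [ha]), if_neg (by simp [hb]), h1]
      · have ha : (M.foldl pvStepA (([], []) : List String × List Char)).2 ≠ [] := by
          rw [h2]
          exact pv_join_ne_nil _ hb (fun q hq => (h3 q hq).2)
        rw [if_pos ((pv_bnot_isEmpty _).mpr ha), if_pos ((pv_bnot_isEmpty _).mpr hb), h1, h2]
    rw [hfin, pv_foldB_emitAux M hMne [] [], pv_emit_eq_aux M hMne]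
    rfl
  · rw [if_pos hg, if_pos hg]
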